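-- pv_equiv track=rewrite | github.com/fcorreas23/SSRToolkit | SSRToolkit.py | get_clean_flanks
-- ===== SOURCE A (Python) =====
-- from typing import Dict, List, Tuple, Any
--
-- def get_clean_flanks(full_seq: str, start0: int, end0: int, flank: int) -> Tuple[str, str]:
--     """
--     Devuelve flancos A/C/G/T a cada lado sin cruzar Ns u otros símbolos.
--     start0/end0 en coordenadas 0-based inclusive del SSR en full_seq.
--     """
--     n = len(full_seq)
--
--     # left
--     left_chars = []
--     i = start0 - 1
--     while i >= 0 and len(left_chars) < flank:
--         c = full_seq[i]
--         if c not in "ACGT":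
--             break
--         left_chars.append(c)
--         i -= 1
--     left_flank = "".join(reversed(left_chars))
--
--     # right
--     right_chars = []
--     i = end0 + 1
--     while i < n and len(right_chars) < flank:
--         c = full_seq[i]
--         if c not in "ACGT":
--             break
--         right_chars.append(c)
--         i += 1
--     right_flank = "".join(right_chars)
--
--     return left_flank, right_flank
-- ===== SOURCE B (Python) =====
-- def get_clean_flanks(full_seq: str, start0: int, end0: int, flank: int):
--     """Window-then-boundary version: slice the two flank-bounded windows out of
--     full_seq (bounds clamped to the sequence), then cut each window at the
--     nearest non-ACGT position."""
--     left_win = full_seq[max(start0 - flank, 0):max(start0, 0)]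
--     lo = max(end0 + 1, 0)
--     right_win = full_seq[lo:lo + max(flank, 0)]
--     # longest all-ACGT suffix of left_win: cut after the last non-ACGT position
--     cut = next((j for j in range(len(left_win) - 1, -1, -1)
--                 if left_win[j] not in "ACGT"), -1)
--     left_flank = left_win[cut + 1:]
--     # longest all-ACGT prefix of right_win: cut at the first non-ACGT position
--     stop = next((j for j in range(len(right_win))
--                  if right_win[j] not in "ACGT"), len(right_win))
--     right_flank = right_win[:stop]
--     return left_flank, right_flank
-- ===== Notes on version B (the rewrite author's own statement) =====
-- stated objective: idiomatic
-- what changed: Replaces the two per-character index-walking while-loops (char accumulation plus a reversed join) by slicing the two flank-bounded windows out of full_seq and cutting each window at the nearest non-ACGT position (last such position for the left window, first for the right).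
-- outside the precondition, e.g. on get_clean_flanks('ACGT', 0, -2, 2): A returns ('', 'TA'), B returns ('', 'AC'); on get_clean_flanks('ACGT', 6, 0, 1): A raises IndexError, B returns ('', 'C')
import Mathlib
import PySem

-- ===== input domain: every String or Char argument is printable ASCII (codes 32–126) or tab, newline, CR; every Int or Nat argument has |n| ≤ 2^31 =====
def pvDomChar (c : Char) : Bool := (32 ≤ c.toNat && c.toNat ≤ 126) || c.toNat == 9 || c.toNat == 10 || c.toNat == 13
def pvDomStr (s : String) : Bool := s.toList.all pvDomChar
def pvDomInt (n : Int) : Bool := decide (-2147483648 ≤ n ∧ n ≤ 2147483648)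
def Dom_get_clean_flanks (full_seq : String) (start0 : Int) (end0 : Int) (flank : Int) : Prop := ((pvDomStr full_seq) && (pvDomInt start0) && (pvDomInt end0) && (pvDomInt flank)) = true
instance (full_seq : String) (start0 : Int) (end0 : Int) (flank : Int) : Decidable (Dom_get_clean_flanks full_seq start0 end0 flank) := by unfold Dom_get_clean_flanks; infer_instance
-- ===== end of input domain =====

-- B slices the two flank-bounded windows out of the sequence (bounds clamped to it) and trims
-- each at the nearest non-ACGT position, instead of A's per-character while-loops; same cost,
-- plainer shape.
-- ===== PORT A =====

-- the string constant "ACGT" as a char list (membership `c in "ACGT"` for a single char c)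
def pvACGT : List Char := ['A', 'C', 'G', 'T']

-- A's left while-loop: i walks down from start0-1 while chars are ACGT and fewer than flank
-- are collected; the fuel bounds the iteration count (i ≥ 0 and i drops by 1 each step).
def pvA_left (s : List Char) (flank : Int) : Nat → Int → List Char → List Char
  | 0, _, acc => acc
  | fuel + 1, i, acc =>
    if 0 ≤ i ∧ (acc.length : Int) < flank then
      match PySem.List.pyGet? s i with
      | some c => if c ∈ pvACGT then pvA_left s flank fuel (i - 1) (acc ++ [c]) else acc
      | none => acc  -- IndexError (outside Pre_)
    else acc

-- A's right while-loop: i walks up from end0+1 while i < n, chars are ACGT and fewer than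
-- flank are collected; the fuel bounds the iteration count (i < n and i grows by 1 each step).
def pvA_right (s : List Char) (n : Int) (flank : Int) : Nat → Int → List Char → List Char
  | 0, _, acc => acc
  | fuel + 1, i, acc =>
    if i < n ∧ (acc.length : Int) < flank then
      match PySem.List.pyGet? s i with
      | some c => if c ∈ pvACGT then pvA_right s n flank fuel (i + 1) (acc ++ [c]) else acc
      | none => acc  -- IndexError / negative-index wraparound region (outside Pre_)
    else acc

def get_clean_flanks (full_seq : String) (start0 : Int) (end0 : Int) (flank : Int) : String × String :=
  let s := full_seq.toList
  let n : Int := s.length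
  let left_chars := pvA_left s flank start0.toNat (start0 - 1) []
  let left_flank := String.ofList left_chars.reverse   -- "".join(reversed(left_chars))
  let right_chars := pvA_right s n flank (n - (end0 + 1)).toNat (end0 + 1) []
  (left_flank, String.ofList right_chars)              -- "".join(right_chars)

-- ===== PORT B =====
def get_clean_flanks_alt (full_seq : String) (start0 : Int) (end0 : Int) (flank : Int) : String × String :=
  let s := full_seq.toList
  let left_win := PySem.List.slice s (some (max (start0 - flank) 0)) (some (max start0 0))
  let lo := max (end0 + 1) 0
  let right_win := PySem.List.slice s (some lo) (some (lo + max flank 0))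
  -- cut = next((j for j in range(len(left_win)-1, -1, -1) if left_win[j] not in "ACGT"), -1)
  -- (j only takes valid indices of left_win, so pyGetD's default char is never read)
  let cut : Int := (((PySem.List.pyRange ((left_win.length : Int) - 1) (-1) (-1)).find?
      (fun j => decide (PySem.List.pyGetD left_win j ' ' ∉ pvACGT))).getD (-1))
  let left_flank := PySem.List.slice left_win (some (cut + 1)) none
  -- stop = next((j for j in range(len(right_win)) if right_win[j] not in "ACGT"), len(right_win))
  let stop : Int := (((PySem.List.pyRange 0 (right_win.length : Int) 1).find?
      (fun j => decide (PySem.List.pyGetD right_win j ' ' ∉ pvACGT))).getD ((right_win.length : Int)))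
  let right_flank := PySem.List.slice right_win none (some stop)
  (String.ofList left_flank, String.ofList right_flank)

-- ===== PRECONDITION & SPEC =====
-- Pre_ excludes only the out-of-domain coordinate region that a positive flank turns into an
-- accident of A's indexing: start0 past the end of the sequence (A raises IndexError) and
-- end0 + 1 < 0 (A silently reads characters through Python's negative-index wraparound, or
-- raises); with flank ≤ 0 neither loop ever indexes, so those coordinates stay admitted.
def Pre_get_clean_flanks (full_seq : String) (start0 : Int) (end0 : Int) (flank : Int) : Prop :=
  (start0 ≤ (full_seq.toList.length : Int) ∨ flank ≤ 0) ∧ (-1 ≤ end0 ∨ flank ≤ 0)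
instance (full_seq : String) (start0 : Int) (end0 : Int) (flank : Int) : Decidable (Pre_get_clean_flanks full_seq start0 end0 flank) := by unfold Pre_get_clean_flanks; infer_instance
def pvWitness_get_clean_flanks : String × Int × Int × Int := ("ACGTNAC", 2, 3, 5)

def Spec_get_clean_flanks (full_seq : String) (start0 : Int) (end0 : Int) (flank : Int) (out : String × String) : Prop := out = get_clean_flanks_alt full_seq start0 end0 flank
instance (full_seq : String) (start0 : Int) (end0 : Int) (flank : Int) (out : String × String) : Decidable (Spec_get_clean_flanks full_seq start0 end0 flank out) := by unfold Spec_get_clean_flanks; infer_instance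

-- ===== CLAIM (what is proved, stated in full; the proofs are below) =====
def Claim_equal_get_clean_flanks : Prop := ∀ (full_seq : String) (start0 : Int) (end0 : Int) (flank : Int), Dom_get_clean_flanks full_seq start0 end0 flank → Pre_get_clean_flanks full_seq start0 end0 flank → Spec_get_clean_flanks full_seq start0 end0 flank (get_clean_flanks full_seq start0 end0 flank)

-- ===== LEMMAS AND PROOFS =====

-- Bool form of the ACGT membership test, for the takeWhile characterisations
def pvP (c : Char) : Bool := decide (c ∈ pvACGT)

theorem pv_takeWhile_take (l : List Char) (m : Nat) :
    (l.take m).takeWhile pvP = (l.takeWhile pvP).take m := by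
  induction l generalizing m with
  | nil => simp
  | cons c t ih =>
    cases m with
    | zero => simp
    | succ m =>
      by_cases h : pvP c <;> simp [h, ih]

theorem pvA_left_eq (s : List Char) (flank : Int) (k : Nat) (hk : k ≤ s.length) (acc : List Char) :
    pvA_left s flank k ((k : Int) - 1) acc
      = acc ++ (((s.take k).reverse.takeWhile pvP).take (flank - acc.length).toNat) := by
  induction k generalizing acc with
  | zero => simp [pvA_left]
  | succ k ih =>
    have hk' : k < s.length := by omega
    rw [pvA_left]
    push_cast
    have hi : ((k : Nat) + 1 : Int) - 1 = (k : Int) := by ring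
    by_cases h2 : (acc.length : Int) < flank
    · rw [if_pos ⟨by omega, h2⟩]
      have hget : PySem.List.pyGet? s (((k : Nat) + 1 : Int) - 1) = some s[k] := by
        rw [hi]; simp [PySem.List.pyGet?_natCast, List.getElem?_eq_getElem hk']
      rw [hget]; dsimp only
      have htake : (s.take (k + 1)).reverse = s[k] :: (s.take k).reverse := by
        rw [List.take_add_one]
        simp [List.getElem?_eq_getElem hk']
      by_cases hc : s[k] ∈ pvACGT
      · rw [if_pos hc, hi, ih (by omega)]
        have hp : pvP s[k] = true := by simp [pvP, hc]
        have hn : (flank - acc.length).toNat = (flank - ((acc ++ [s[k]]).length)).toNat + 1 := by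
          simp; omega
        rw [htake, List.takeWhile_cons, hp, hn]
        simp
      · rw [if_neg hc]
        have hp : pvP s[k] = false := by simp [pvP, hc]
        rw [htake, List.takeWhile_cons, hp]
        simp
    · rw [if_neg (by tauto)]
      have : (flank - acc.length).toNat = 0 := by omega
      simp [this]

theorem pvA_right_eq (s : List Char) (flank : Int) (fuel : Nat) (e : Nat)
    (hf : fuel = s.length - e) (acc : List Char) :
    pvA_right s (s.length : Int) flank fuel (e : Int) acc
      = acc ++ (((s.drop e).takeWhile pvP).take (flank - acc.length).toNat) := by
  induction fuel generalizing e acc with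
  | zero =>
    have : s.length ≤ e := by omega
    simp [pvA_right, List.drop_eq_nil_of_le this]
  | succ fuel ih =>
    have he : e < s.length := by omega
    rw [pvA_right]
    by_cases h2 : (acc.length : Int) < flank
    · rw [if_pos ⟨by exact_mod_cast he, h2⟩]
      have hget : PySem.List.pyGet? s (e : Int) = some s[e] := by
        simp [PySem.List.pyGet?_natCast, List.getElem?_eq_getElem he]
      rw [hget]; dsimp only
      have hdrop : s.drop e = s[e] :: s.drop (e + 1) := List.drop_eq_getElem_cons he
      by_cases hc : s[e] ∈ pvACGT
      · rw [if_pos hc]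
        have hcast : (e : Int) + 1 = ((e + 1 : Nat) : Int) := by push_cast; ring
        rw [hcast, ih (e + 1) (by omega)]
        have hp : pvP s[e] = true := by simp [pvP, hc]
        have hn : (flank - acc.length).toNat = (flank - ((acc ++ [s[e]]).length)).toNat + 1 := by
          simp; omega
        rw [hdrop, List.takeWhile_cons, hp, hn]
        simp
      · rw [if_neg hc]
        have hp : pvP s[e] = false := by simp [pvP, hc]
        rw [hdrop, List.takeWhile_cons, hp]
        simp
    · rw [if_neg (by tauto)]
      have : (flank - acc.length).toNat = 0 := by omega
      simp [this]

theorem pv_find?_congr (l : List Int) (p q : Int → Bool) (h : ∀ a ∈ l, p a = q a) :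
    l.find? p = l.find? q := by
  induction l with
  | nil => rfl
  | cons a t ih =>
    have ha := h a (by simp)
    rw [List.find?_cons, List.find?_cons, ha]
    cases hq : q a with
    | true => rfl
    | false => exact ih (fun b hb => h b (by simp [hb]))

theorem pv_stop_aux (w : List Char) (fuel a : Nat) (ha : a ≤ w.length) (hf : fuel = w.length - a) :
    (w.drop a).take ((((PySem.List.pyRange (a : Int) (w.length : Int) 1).find?
        (fun j => decide (PySem.List.pyGetD w j ' ' ∉ pvACGT))).getD (w.length : Int) - a).toNat)
      = (w.drop a).takeWhile pvP := by
  induction fuel generalizing a with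
  | zero =>
    have h1 : a = w.length := by omega
    simp [List.drop_eq_nil_of_le (le_of_eq h1.symm)]
  | succ fuel ih =>
    have ha' : a < w.length := by omega
    have hr : PySem.List.pyRange (a : Int) (w.length : Int) 1
        = (a : Int) :: PySem.List.pyRange ((a : Int) + 1) (w.length : Int) 1 :=
      PySem.List.pyRange_one_cons (by exact_mod_cast ha')
    have hgd : PySem.List.pyGetD w (a : Int) ' ' = w[a] := by
      rw [PySem.List.pyGetD_natCast]
      exact List.getD_eq_getElem w ' ' ha'
    have hdrop : w.drop a = w[a] :: w.drop (a + 1) := List.drop_eq_getElem_cons ha'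
    rw [hr, List.find?_cons, hgd]
    by_cases hc : w[a] ∈ pvACGT
    · have hdec : decide (w[a] ∉ pvACGT) = false := by simp [hc]
      rw [hdec]; dsimp only
      have hcast : ((a : Int) + 1) = ((a + 1 : Nat) : Int) := by push_cast; ring
      rw [hcast]
      set v := ((PySem.List.pyRange ((a + 1 : Nat) : Int) (w.length : Int) 1).find?
          (fun j => decide (PySem.List.pyGetD w j ' ' ∉ pvACGT))).getD (w.length : Int) with hv
      have hvge : ((a + 1 : Nat) : Int) ≤ v := by
        rcases hfind : (PySem.List.pyRange ((a + 1 : Nat) : Int) (w.length : Int) 1).find?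
            (fun j => decide (PySem.List.pyGetD w j ' ' ∉ pvACGT)) with _ | j
        · rw [hv, hfind]; simp; exact_mod_cast by omega
        · have hmem := List.mem_of_find?_eq_some hfind
          rw [PySem.List.mem_pyRange_one] at hmem
          rw [hv, hfind]; simp; omega
      have hn : (v - a).toNat = (v - (a + 1 : Nat)).toNat + 1 := by
        push_cast at hvge ⊢; omega
      have hp : pvP w[a] = true := by simp [pvP, hc]
      rw [hdrop, hn, List.take_succ_cons, List.takeWhile_cons, hp, ← ih (a + 1) (by omega) (by omega)]
      rw [if_pos rfl, hv]
    · have hdec : decide (w[a] ∉ pvACGT) = true := by simp [hc]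
      rw [hdec]; dsimp only
      have hp : pvP w[a] = false := by simp [pvP, hc]
      rw [hdrop, List.takeWhile_cons, hp]
      simp

theorem pvB_stop_eq (w : List Char) :
    w.take ((((PySem.List.pyRange 0 (w.length : Int) 1).find?
        (fun j => decide (PySem.List.pyGetD w j ' ' ∉ pvACGT))).getD (w.length : Int)).toNat)
      = w.takeWhile pvP := by
  have := pv_stop_aux w w.length 0 (by omega) (by omega)
  simpa using this

theorem pvB_cut_eq (w : List Char) :
    w.drop (((((PySem.List.pyRange ((w.length : Int) - 1) (-1) (-1)).find?
        (fun j => decide (PySem.List.pyGetD w j ' ' ∉ pvACGT))).getD (-1)) + 1).toNat)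
      = (w.reverse.takeWhile pvP).reverse := by
  induction w using List.reverseRecOn with
  | nil => simp
  | append_singleton w0 c ih =>
    have hL : (((w0 ++ [c]).length : Int) - 1) = (w0.length : Int) := by
      simp
    have hr : PySem.List.pyRange ((w0.length : Int)) (-1) (-1)
        = (w0.length : Int) :: PySem.List.pyRange ((w0.length : Int) - 1) (-1) (-1) :=
      PySem.List.pyRange_neg_one_cons (by omega)
    have hgd : PySem.List.pyGetD (w0 ++ [c]) ((w0.length : Int)) ' ' = c := by
      rw [PySem.List.pyGetD_natCast]
      rw [List.getD_eq_getElem (w0 ++ [c]) ' ' (by simp)]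
      simp
    rw [hL, hr, List.find?_cons, hgd]
    by_cases hc : c ∈ pvACGT
    · have hdec : decide (c ∉ pvACGT) = false := by simp [hc]
      rw [hdec]; dsimp only
      have hcong : (PySem.List.pyRange ((w0.length : Int) - 1) (-1) (-1)).find?
            (fun j => decide (PySem.List.pyGetD (w0 ++ [c]) j ' ' ∉ pvACGT))
          = (PySem.List.pyRange ((w0.length : Int) - 1) (-1) (-1)).find?
            (fun j => decide (PySem.List.pyGetD w0 j ' ' ∉ pvACGT)) := by
        apply pv_find?_congr
        intro j hj
        rw [PySem.List.mem_pyRange_neg_one] at hj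
        have h0 : 0 ≤ j := by omega
        have h1 : j < (w0.length : Int) := by omega
        have e1 : PySem.List.pyGetD (w0 ++ [c]) j ' ' = w0[j.toNat]'(by omega) := by
          rw [PySem.List.pyGetD_eq_getElem (w0 ++ [c]) ' ' h0 (by simp; omega)]
          exact List.getElem_append_left _
        have e2 : PySem.List.pyGetD w0 j ' ' = w0[j.toNat]'(by omega) :=
          PySem.List.pyGetD_eq_getElem w0 ' ' h0 (by exact_mod_cast h1)
        rw [e1, e2]
      rw [hcong]
      set v := ((PySem.List.pyRange ((w0.length : Int) - 1) (-1) (-1)).find?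
          (fun j => decide (PySem.List.pyGetD w0 j ' ' ∉ pvACGT))).getD (-1) with hv
      have hvle : v ≤ (w0.length : Int) - 1 ∧ -1 ≤ v := by
        rcases hfind : (PySem.List.pyRange ((w0.length : Int) - 1) (-1) (-1)).find?
            (fun j => decide (PySem.List.pyGetD w0 j ' ' ∉ pvACGT)) with _ | j
        · rw [hv, hfind]; simp; omega
        · have hmem := List.mem_of_find?_eq_some hfind
          rw [PySem.List.mem_pyRange_neg_one] at hmem
          rw [hv, hfind]; simp; omega
      have hdropapp : (w0 ++ [c]).drop ((v + 1).toNat) = w0.drop ((v + 1).toNat) ++ [c] :=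
        List.drop_append_of_le_length (by omega)
      rw [hdropapp, ih]
      have hp : pvP c = true := by simp [pvP, hc]
      rw [List.reverse_append, List.reverse_singleton, List.singleton_append,
        List.takeWhile_cons, hp]
      simp
    · have hdec : decide (c ∉ pvACGT) = true := by simp [hc]
      rw [hdec]; dsimp only
      have hp : pvP c = false := by simp [pvP, hc]
      rw [List.reverse_append, List.reverse_singleton, List.singleton_append,
        List.takeWhile_cons, hp]
      simp


-- the left cut index is ≥ -1 (it is -1 or an element of the countdown range)
theorem pv_cut_ge (w : List Char) :
    -1 ≤ ((PySem.List.pyRange ((w.length : Int) - 1) (-1) (-1)).find?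
      (fun j => decide (PySem.List.pyGetD w j ' ' ∉ pvACGT))).getD (-1) := by
  rcases hfind : (PySem.List.pyRange ((w.length : Int) - 1) (-1) (-1)).find?
      (fun j => decide (PySem.List.pyGetD w j ' ' ∉ pvACGT)) with _ | j
  · simp
  · have hmem := List.mem_of_find?_eq_some hfind
    rw [PySem.List.mem_pyRange_neg_one] at hmem
    simp; omega

-- the right stop index is ≥ 0 (it is len or an element of the upward range)
theorem pv_stop_nonneg (w : List Char) :
    0 ≤ ((PySem.List.pyRange 0 (w.length : Int) 1).find?
      (fun j => decide (PySem.List.pyGetD w j ' ' ∉ pvACGT))).getD ((w.length : Int)) := by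
  rcases hfind : (PySem.List.pyRange 0 (w.length : Int) 1).find?
      (fun j => decide (PySem.List.pyGetD w j ' ' ∉ pvACGT)) with _ | j
  · simp
  · have hmem := List.mem_of_find?_eq_some hfind
    rw [PySem.List.mem_pyRange_one] at hmem
    simp; omega

-- with a non-positive flank the loops collect nothing
theorem pvA_left_nonpos (s : List Char) (flank : Int) (fuel : Nat) (i : Int) (h : flank ≤ 0) :
    pvA_left s flank fuel i [] = [] := by
  cases fuel with
  | zero => rfl
  | succ f => rw [pvA_left, if_neg (by simp; omega)]

theorem pvA_right_nonpos (s : List Char) (n : Int) (flank : Int) (fuel : Nat) (i : Int) (h : flank ≤ 0) :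
    pvA_right s n flank fuel i [] = [] := by
  cases fuel with
  | zero => rfl
  | succ f => rw [pvA_right, if_neg (by simp; omega)]

-- ===== VERDICT (by name: the statement is the Claim_ definition above) =====
theorem get_clean_flanks_spec : Claim_equal_get_clean_flanks := by
  intro fs start0 end0 flank _ hpre
  obtain ⟨hA, hB⟩ := hpre
  unfold Spec_get_clean_flanks get_clean_flanks get_clean_flanks_alt
  dsimp only
  set s := fs.toList with hs
  rw [Prod.mk.injEq]
  constructor
  · -- left flank
    refine congrArg String.ofList ?_
    by_cases hs0 : 0 ≤ start0
    · have hmax1 : max start0 0 = start0 := max_eq_left hs0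
      rw [hmax1]
      by_cases hsn : start0 ≤ (s.length : Int)
      · -- the documented case: 0 ≤ start0 ≤ len
        set k := start0.toNat with hkdef
        have hk : start0 = (k : Int) := (Int.toNat_of_nonneg hs0).symm
        have hkle : k ≤ s.length := by omega
        have hAleft : pvA_left s flank start0.toNat (start0 - 1) []
            = ((s.take k).reverse.takeWhile pvP).take flank.toNat := by
          rw [show start0 - 1 = (k : Int) - 1 by omega, ← hkdef, pvA_left_eq s flank k hkle []]
          simp
        have ha0 : (0 : Int) ≤ max (start0 - flank) 0 := le_max_right _ _
        have hwin : PySem.List.slice s (some (max (start0 - flank) 0)) (some start0)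
            = (s.take k).drop (max (start0 - flank) 0).toNat := by
          rw [PySem.List.slice_toNat s ha0 hs0, List.drop_take, hk]
          congr 1
        set a' := (max (start0 - flank) 0).toNat with ha'
        have hBleft : PySem.List.slice (PySem.List.slice s (some (max (start0 - flank) 0)) (some start0))
              (some ((((PySem.List.pyRange (((PySem.List.slice s (some (max (start0 - flank) 0)) (some start0)).length : Int) - 1) (-1) (-1)).find?
                (fun j => decide (PySem.List.pyGetD (PySem.List.slice s (some (max (start0 - flank) 0)) (some start0)) j ' ' ∉ pvACGT))).getD (-1)) + 1)) none
            = ((((s.take k).drop a').reverse.takeWhile pvP)).reverse := by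
          rw [PySem.List.slice_from _ (by have := pv_cut_ge (PySem.List.slice s (some (max (start0 - flank) 0)) (some start0)); omega)]
          rw [pvB_cut_eq, hwin]
        rw [hAleft, hBleft]
        have hlen : (s.take k).length = k := by simp [hkle]
        have hrev : ((s.take k).drop a').reverse = (s.take k).reverse.take (k - a') := by
          rw [List.reverse_drop, hlen]
        rw [hrev, pv_takeWhile_take]
        have hTW : ((s.take k).reverse.takeWhile pvP).length ≤ k := by
          have h := (List.takeWhile_sublist (l := (s.take k).reverse) (p := pvP)).length_le
          simpa [hlen] using h
        have hcase : k - a' = flank.toNat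
            ∨ (((s.take k).reverse.takeWhile pvP).length ≤ k - a'
               ∧ ((s.take k).reverse.takeWhile pvP).length ≤ flank.toNat) := by
          omega
        rcases hcase with hgl | ⟨hl1, hl2⟩
        · rw [hgl]
        · rw [List.take_of_length_le hl2, List.take_of_length_le hl1]
      · -- start0 beyond the sequence: Pre_ forces flank ≤ 0, both sides empty
        have hfl : flank ≤ 0 := by rcases hA with h | h <;> omega
        rw [pvA_left_nonpos s flank _ _ hfl]
        have hw : PySem.List.slice s (some (max (start0 - flank) 0)) (some start0) = [] := by
          rw [PySem.List.slice_toNat s (le_max_right _ _) hs0]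
          have : start0.toNat - (max (start0 - flank) 0).toNat = 0 := by omega
          rw [this]
          simp
        rw [PySem.List.slice_from _ (by have := pv_cut_ge (PySem.List.slice s (some (max (start0 - flank) 0)) (some start0)); omega)]
        rw [pvB_cut_eq, hw]
        simp
    · -- start0 < 0: A's loop never starts, B's window is empty
      have hmax1 : max start0 0 = (0 : Int) := max_eq_right (by omega)
      rw [hmax1, show start0.toNat = 0 by omega]
      have hw : PySem.List.slice s (some (max (start0 - flank) 0)) (some (0 : Int)) = [] := by
        rw [PySem.List.slice_toNat s (le_max_right _ _) (by omega)]
        simp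
      rw [PySem.List.slice_from _ (by have := pv_cut_ge (PySem.List.slice s (some (max (start0 - flank) 0)) (some (0 : Int))); omega)]
      rw [pvB_cut_eq, hw]
      simp [pvA_left]
  · -- right flank
    refine congrArg String.ofList ?_
    by_cases hd : -1 ≤ end0
    · -- the documented case: end0 + 1 ≥ 0
      have he0 : 0 ≤ end0 + 1 := by omega
      have hmax2 : max (end0 + 1) 0 = end0 + 1 := max_eq_left he0
      rw [hmax2]
      set e := (end0 + 1).toNat with hedef
      have he : end0 + 1 = (e : Int) := (Int.toNat_of_nonneg he0).symm
      have hAright : pvA_right s (s.length : Int) flank ((s.length : Int) - (end0 + 1)).toNat (end0 + 1) []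
          = ((s.drop e).takeWhile pvP).take flank.toNat := by
        rw [he, show (((s.length : Int)) - (e : Int)).toNat = s.length - e by omega,
          pvA_right_eq s flank (s.length - e) e rfl []]
        simp
      have hb0 : (0 : Int) ≤ end0 + 1 + max flank 0 := by
        have := le_max_right flank (0 : Int); omega
      have hrwin : PySem.List.slice s (some (end0 + 1)) (some (end0 + 1 + max flank 0))
          = (s.drop e).take flank.toNat := by
        rw [PySem.List.slice_toNat s he0 hb0]
        congr 1
        omega
      have hBright : PySem.List.slice (PySem.List.slice s (some (end0 + 1)) (some (end0 + 1 + max flank 0)))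
            none (some (((PySem.List.pyRange 0 (((PySem.List.slice s (some (end0 + 1)) (some (end0 + 1 + max flank 0))).length : Int)) 1).find?
              (fun j => decide (PySem.List.pyGetD (PySem.List.slice s (some (end0 + 1)) (some (end0 + 1 + max flank 0))) j ' ' ∉ pvACGT))).getD
              (((PySem.List.slice s (some (end0 + 1)) (some (end0 + 1 + max flank 0))).length : Int))))
          = ((s.drop e).take flank.toNat).takeWhile pvP := by
        rw [PySem.List.slice_to _ (pv_stop_nonneg _), pvB_stop_eq, hrwin]
      rw [hAright, hBright, pv_takeWhile_take]
    · -- end0 + 1 < 0: Pre_ forces flank ≤ 0, both sides empty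
      have hfl : flank ≤ 0 := by rcases hB with h | h <;> omega
      rw [pvA_right_nonpos s _ flank _ _ hfl]
      have hmax2 : max (end0 + 1) 0 = (0 : Int) := max_eq_right (by omega)
      have hmf : max flank 0 = (0 : Int) := max_eq_right hfl
      rw [hmax2, hmf]
      have hw : PySem.List.slice s (some (0 : Int)) (some ((0 : Int) + 0)) = [] := by
        rw [PySem.List.slice_toNat s (by omega) (by omega)]
        simp
      rw [PySem.List.slice_to _ (pv_stop_nonneg _), pvB_stop_eq, hw]
      simp
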